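-- pv_equiv track=rewrite | github.com/nikita8/RelationalDB | FD.py | seed_In_Set
-- ===== SOURCE A (Python) =====
-- def powerset(s):
--     x = len(s)
--     masks = [1 << i for i in range(x)]
--     for i in range(1,1 << x):
--         yield [ss for mask, ss in zip(masks, s) if i & mask]
--
-- def seed_In_Set(seed,lhs):
--     all_subset_of_seed =list(powerset(list(seed)))
--     seed_list=[]
--     for i in all_subset_of_seed:
--         listTostr = ''.join(map(str,i))
--         seed_list.append(listTostr)
--     # we have all subset of seed in seed_list
--     for i in seed_list:
--         if(i in lhs):
--             #if any subset seed matches the lhs will return True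
--             return True
--     return False
-- ===== SOURCE B (Python) =====
-- def seed_In_Set(seed, lhs):
--     # For each candidate string, greedily test whether it is a nonempty
--     # order-preserving subsequence of seed (what A enumerates exhaustively).
--     def is_subseq(x, s):
--         it = iter(s)
--         return all(c in it for c in x)
--     return any(x != "" and is_subseq(x, seed) for x in lhs)
-- ===== Notes on version B (the rewrite author's own statement) =====
-- stated objective: faster
-- what changed: Instead of materialising all 2^n-1 nonempty subsequences of seed and testing each for membership in lhs, B tests each string of lhs directly with a linear greedy subsequence check against seed.
import Mathlib
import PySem

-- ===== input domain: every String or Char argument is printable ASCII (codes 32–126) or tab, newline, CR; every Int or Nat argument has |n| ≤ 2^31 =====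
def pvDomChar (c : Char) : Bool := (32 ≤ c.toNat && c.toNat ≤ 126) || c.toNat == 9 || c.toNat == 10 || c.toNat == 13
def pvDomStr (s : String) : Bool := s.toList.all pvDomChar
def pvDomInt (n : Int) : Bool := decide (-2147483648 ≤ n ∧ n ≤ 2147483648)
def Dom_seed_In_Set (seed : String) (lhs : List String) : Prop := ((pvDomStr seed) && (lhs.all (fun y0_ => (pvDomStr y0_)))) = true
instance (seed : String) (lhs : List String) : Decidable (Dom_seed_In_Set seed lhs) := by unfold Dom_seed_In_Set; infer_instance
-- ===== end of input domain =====

-- B replaces A's enumeration of all 2^n-1 nonempty subsequences of seed by a direct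
-- greedy subsequence test of each lhs string against seed (objective: faster).

-- ===== PORT A =====
def seed_In_Set (seed : String) (lhs : List String) : Bool :=
  let s := seed.toList
  let x := s.length
  let masks := (List.range x).map (fun i => ((1 <<< i : Nat) : Int))
  let all_subset_of_seed := (PySem.List.pyRange 1 ((1 <<< x : Nat) : Int) 1).map
    (fun i => ((masks.zip s).filter (fun p => PySem.Int.band i p.1 != 0)).map (·.2))
  let seed_list := all_subset_of_seed.map (fun cs => String.ofList cs)
  seed_list.any (fun i => lhs.contains i)

-- ===== PORT B =====
-- the greedy 'iterator' scan of Source B: consume seed left to right, matching x's chars in order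
def isSubseqChars : List Char → List Char → Bool
  | [], _ => true
  | _ :: _, [] => false
  | a :: as, b :: bs => if a == b then isSubseqChars as bs else isSubseqChars (a :: as) bs

def seed_In_Set_alt (seed : String) (lhs : List String) : Bool :=
  lhs.any (fun x => x != "" && isSubseqChars x.toList seed.toList)

-- ===== PRECONDITION & SPEC =====
def Spec_seed_In_Set (seed : String) (lhs : List String) (out : Bool) : Prop := out = seed_In_Set_alt seed lhs
instance (seed : String) (lhs : List String) (out : Bool) : Decidable (Spec_seed_In_Set seed lhs out) := by unfold Spec_seed_In_Set; infer_instance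

-- ===== CLAIM (what is proved, stated in full; the proofs are below) =====
def Claim_equal_seed_In_Set : Prop := ∀ (seed : String) (lhs : List String), Dom_seed_In_Set seed lhs → Spec_seed_In_Set seed lhs (seed_In_Set seed lhs)

-- ===== LEMMAS AND PROOFS =====

-- structural form of A's mask filter: bit j of m selects the j-th character
def recFilter : Nat → List Char → List Char
  | _, [] => []
  | m, c :: t => if m % 2 = 1 then c :: recFilter (m / 2) t else recFilter (m / 2) t

theorem recFilter_zero (s : List Char) : recFilter 0 s = [] := by
  induction s with
  | nil => rfl
  | cons c t ih => simp [recFilter, ih]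

theorem recFilter_sublist (m : Nat) (s : List Char) : List.Sublist (recFilter m s) s := by
  induction s generalizing m with
  | nil => simp [recFilter]
  | cons c t ih =>
    simp only [recFilter]
    split
    · exact List.cons_sublist_cons.mpr (ih _)
    · exact (ih _).cons c

-- A's zip/filter over the masks list computes recFilter of the shifted mask
theorem maskFilter_eq_recFilter (t : List Char) (k m : Nat) :
    ((((List.range t.length).map (fun i => ((1 <<< (i + k) : Nat) : Int))).zip t).filter
        (fun p => PySem.Int.band (↑m) p.1 != 0)).map (·.2) = recFilter (m >>> k) t := by
  induction t generalizing k with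
  | nil => simp [recFilter]
  | cons c t ih =>
    have hrange : List.range (t.length + 1) = 0 :: (List.range t.length).map Nat.succ :=
      List.range_succ_eq_map
    have hmap : ((List.range t.length).map Nat.succ).map (fun i => ((1 <<< (i + k) : Nat) : Int))
        = (List.range t.length).map (fun i => ((1 <<< (i + (k + 1)) : Nat) : Int)) := by
      rw [List.map_map]; apply List.map_congr_left; intro a _
      have : a.succ + k = a + (k + 1) := by omega
      simp [Function.comp, this]
    have hcond : (PySem.Int.band (↑m) ((1 <<< (0 + k) : Nat) : Int) != 0) = m.testBit k := by
      rw [Nat.zero_add, Nat.one_shiftLeft, PySem.Int.band_natCast, Nat.and_two_pow]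
      cases h : m.testBit k <;> simp
    have hsb : m.testBit k = decide ((m >>> k) % 2 = 1) := by
      rw [Nat.testBit_eq_decide_div_mod_eq, Nat.shiftRight_eq_div_pow]
    have hdiv : m >>> (k + 1) = (m >>> k) / 2 := Nat.shiftRight_succ m k
    simp only [List.length_cons, hrange, List.map_cons, hmap, List.zip_cons_cons,
      List.filter_cons, hcond]
    cases htb : m.testBit k with
    | true =>
      have h2 : (m >>> k) % 2 = 1 := by rw [hsb] at htb; exact of_decide_eq_true htb
      rw [if_pos rfl, List.map_cons, ih (k + 1)]
      simp [recFilter, h2, ← hdiv]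
    | false =>
      have h2 : ¬ ((m >>> k) % 2 = 1) := by rw [hsb] at htb; exact of_decide_eq_false htb
      rw [if_neg (by simp), ih (k + 1)]
      simp [recFilter, h2, ← hdiv]

-- the nonempty outputs of recFilter over masks below 2^|s| are exactly the nonempty sublists
theorem recFilter_surj (s x : List Char) :
    (∃ m : Nat, m < 2 ^ s.length ∧ m ≠ 0 ∧ recFilter m s = x) ↔
      (x ≠ [] ∧ List.Sublist x s) := by
  induction s generalizing x with
  | nil =>
    constructor
    · rintro ⟨m, hlt, hne, _⟩; simp at hlt; omega
    · rintro ⟨hx, hsub⟩; exact absurd (List.sublist_nil.mp hsub) hx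
  | cons c t ih =>
    constructor
    · rintro ⟨m, hlt, hne, rfl⟩
      simp only [recFilter]
      by_cases h : m % 2 = 1
      · simp only [if_pos h]
        exact ⟨by simp, List.cons_sublist_cons.mpr (recFilter_sublist _ t)⟩
      · have hq : m / 2 ≠ 0 := by omega
        have hqlt : m / 2 < 2 ^ t.length := by
          rw [List.length_cons, pow_succ] at hlt; omega
        have hrec := (ih (recFilter (m / 2) t)).mp ⟨m / 2, hqlt, hq, rfl⟩
        simp only [if_neg h]
        exact ⟨hrec.1, hrec.2.cons c⟩
    · rintro ⟨hx, hsub⟩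
      cases hsub with
      | cons _ h =>
        obtain ⟨m, hlt, hne, heq⟩ := (ih x).mpr ⟨hx, h⟩
        refine ⟨2 * m, ?_, by omega, ?_⟩
        · rw [List.length_cons, pow_succ]; omega
        · simp only [recFilter]
          rw [if_neg (by omega), Nat.mul_div_cancel_left m (by norm_num)]
          exact heq
      | @cons₂ y _ _ h =>
        by_cases hy : y = []
        · subst hy
          refine ⟨1, Nat.one_lt_two_pow_iff.mpr (by simp), by omega, ?_⟩
          simp [recFilter, recFilter_zero]
        · obtain ⟨m, hlt, hne, heq⟩ := (ih y).mpr ⟨hy, h⟩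
          refine ⟨2 * m + 1, ?_, by omega, ?_⟩
          · rw [List.length_cons, pow_succ]; omega
          · simp only [recFilter]
            rw [if_pos (by omega)]
            have h21 : (2 * m + 1) / 2 = m := by omega
            rw [h21, heq]

-- the greedy scan decides the sublist relation
theorem isSubseqChars_iff (x s : List Char) :
    isSubseqChars x s = true ↔ List.Sublist x s := by
  induction s generalizing x with
  | nil =>
    cases x with
    | nil => simp [isSubseqChars]
    | cons a as => simp [isSubseqChars]
  | cons b bs ih =>
    cases x with
    | nil => simp [isSubseqChars]
    | cons a as =>
      simp only [isSubseqChars]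
      by_cases h : a = b
      · subst h
        rw [if_pos (by simp), ih, List.cons_sublist_cons]
      · rw [if_neg (by simp [h]), ih]
        constructor
        · exact fun hs => hs.cons b
        · intro hs
          cases hs with
          | cons _ h' => exact h'
          | cons₂ => exact absurd rfl h

theorem seed_In_Set_eq (seed : String) (lhs : List String) :
    seed_In_Set seed lhs = seed_In_Set_alt seed lhs := by
  rw [Bool.eq_iff_iff]
  set s := seed.toList with hs
  have hpow : ((1 <<< s.length : Nat) : Int) = ((2 ^ s.length : Nat) : Int) := by
    rw [Nat.one_shiftLeft]
  constructor
  · intro h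
    simp only [seed_In_Set, List.any_eq_true, List.mem_map, PySem.List.mem_pyRange_one] at h
    obtain ⟨_, ⟨cs, ⟨i, ⟨h1, h2⟩, rfl⟩, rfl⟩, hmem⟩ := h
    obtain ⟨m, rfl⟩ : ∃ m : Nat, i = (m : Int) := ⟨i.toNat, by omega⟩
    rw [hpow] at h2
    have hm : m < 2 ^ s.length := by exact_mod_cast h2
    have hfilter := maskFilter_eq_recFilter s 0 m
    simp only [Nat.add_zero, Nat.shiftRight_zero] at hfilter
    rw [← hs, hfilter] at hmem
    have hx := (recFilter_surj s (recFilter m s)).mp ⟨m, hm, by omega, rfl⟩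
    rw [List.contains_iff_mem] at hmem
    simp only [seed_In_Set_alt, List.any_eq_true]
    refine ⟨String.ofList (recFilter m s), hmem, ?_⟩
    rw [Bool.and_eq_true, isSubseqChars_iff]
    refine ⟨?_, by simpa using hx.2⟩
    apply bne_iff_ne.mpr
    intro hcon
    apply hx.1
    have := congrArg String.toList hcon
    simpa using this
  · intro h
    simp only [seed_In_Set_alt, List.any_eq_true, Bool.and_eq_true, isSubseqChars_iff] at h
    obtain ⟨y, hy, hne, hsub⟩ := h
    have hynil : y.toList ≠ [] := by
      intro hcon
      exact bne_iff_ne.mp hne (String.toList_eq_nil_iff.mp hcon)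
    obtain ⟨m, hm, hmne, heq⟩ := (recFilter_surj s y.toList).mpr ⟨hynil, hsub⟩
    simp only [seed_In_Set, List.any_eq_true, List.mem_map, PySem.List.mem_pyRange_one]
    have hfilter := maskFilter_eq_recFilter s 0 m
    simp only [Nat.add_zero, Nat.shiftRight_zero] at hfilter
    refine ⟨String.ofList y.toList, ⟨y.toList, ⟨(m : Int), ⟨by omega, ?_⟩, ?_⟩, rfl⟩, ?_⟩
    · rw [hpow]; exact_mod_cast hm
    · rw [← hs, hfilter, heq]
    · rw [List.contains_iff_mem]
      have hmk : String.ofList y.toList = y := by simp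
      rwa [hmk]

-- ===== VERDICT (by name: the statement is the Claim_ definition above) =====
theorem seed_In_Set_spec : Claim_equal_seed_In_Set := by
  intro seed lhs _
  unfold Spec_seed_In_Set
  exact seed_In_Set_eq seed lhs
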